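-- pv_equiv track=rewrite | github.com/crypto-ink/ECE456 | lab2 real/Receiver.py | groupings_to_ascii
-- ===== SOURCE A (Python) =====
-- def split(sixteen_bits):            #this function splits sixteen bits in half creating two eight bit outputs
--   left_half = sixteen_bits & 65280  # 65280 in binary is 1111 1111 0000 0000
--                                     # anything and 65280 will only leave the top 8 bits
--   left = left_half >> 8             # shifting left_half to the right by 8 bits to make 16 bit value 8 bits
--   right = sixteen_bits & 255        # 255 in binary is 0000 0000 1111 1111
--                                     # anything and 255 wil leave only the bottom 8 bits
--   return left, right
--
-- def groupings_to_ascii(groups): #this function converts 16 bit groupings back to their ascii values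
--   temp = []   #temp array for use of 8 bit chars.
--   for pair in groups:
--     left_half, right_half = split(pair) #split the grouping into its two characters
--     temp.append(left_half)              #add left char to the temp array
--     temp.append(right_half)             #add right char to the temp array
--   result = ""
--   for x in temp:
--     result += chr(x)                    #convert the temp array into ascii and return as string
--   return result
-- ===== SOURCE B (Python) =====
-- def groupings_to_ascii(groups):
--     n = len(groups)
--     if n == 0:
--         return ""
--     if n == 1:
--         g = groups[0]
--         return chr(g >> 8 & 255) + chr(g & 255)
--     mid = n // 2
--     return groupings_to_ascii(groups[:mid]) + groupings_to_ascii(groups[mid:])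
-- ===== Notes on version B (the rewrite author's own statement) =====
-- stated objective: alternative
-- what changed: B replaces A's two sequential loops (build an int byte list via a split helper, then concatenate chr(x) one by one) with a divide-and-conquer recursion that splits the list in halves, converts each half and concatenates the resulting strings, a singleton emitting its two byte characters directly.
import Mathlib
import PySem

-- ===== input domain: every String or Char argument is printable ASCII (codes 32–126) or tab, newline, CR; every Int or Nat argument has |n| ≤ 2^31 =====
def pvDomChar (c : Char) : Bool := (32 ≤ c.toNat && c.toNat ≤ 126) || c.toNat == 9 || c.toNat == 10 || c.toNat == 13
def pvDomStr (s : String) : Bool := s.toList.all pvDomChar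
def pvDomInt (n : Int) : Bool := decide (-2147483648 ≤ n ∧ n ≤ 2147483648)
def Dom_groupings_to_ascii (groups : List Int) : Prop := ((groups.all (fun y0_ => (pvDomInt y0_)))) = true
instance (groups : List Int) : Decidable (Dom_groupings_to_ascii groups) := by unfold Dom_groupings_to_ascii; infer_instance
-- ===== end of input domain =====

-- B replaces A's two sequential loops (int list built by a split helper, then chr-by-chr string
-- concatenation) with a divide-and-conquer recursion: halve the list, convert each half, concatenate;
-- a singleton emits its two byte characters directly (alternative decomposition, same O(n) cost).


-- ===== PORT A =====
-- split(sixteen_bits): top and bottom byte (Python & and >> via PySem.Int.band / Int's >>>, exact on negatives)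
def pySplit (sixteen_bits : Int) : Int × Int :=
  let left_half := PySem.Int.band sixteen_bits 65280
  let left := left_half >>> (8:Int)
  let right := PySem.Int.band sixteen_bits 255
  (left, right)

-- 'result += chr(x)' is ported through List Char (Lean's String.append is kernel-opaque);
-- chr(x) = Char.ofNat x.toNat, exact here since every x is a result of '& 255' / '& 65280 >> 8', i.e. 0..255.
def groupings_to_ascii (groups : List Int) : String :=
  let temp : List Int := groups.foldl (fun temp pair =>
    let lr := pySplit pair
    (temp ++ [lr.1]) ++ [lr.2]) []
  String.ofList (temp.foldl (fun result x => result ++ [Char.ofNat x.toNat]) [])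

-- ===== PORT B =====
-- divide-and-conquer over List Char (string + is kernel-opaque): n = 0 → "", n = 1 → the two byte
-- chars of the single group ('g >> 8 & 255' and 'g & 255', exact on negatives), else convert the
-- two halves groups[:mid] / groups[mid:] (= take/drop; mid = n // 2 = Nat division, n ≥ 0) and concatenate.
def gtaAltGo (groups : List Int) : List Char :=
  if groups.length = 0 then []
  else if groups.length = 1 then
    let g := groups.headI
    [Char.ofNat (PySem.Int.band (g >>> (8:Int)) 255).toNat, Char.ofNat (PySem.Int.band g 255).toNat]
  else
    let mid := groups.length / 2
    gtaAltGo (groups.take mid) ++ gtaAltGo (groups.drop mid)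
termination_by groups.length
decreasing_by
  · simp [List.length_take]; omega
  · simp [List.length_drop]; omega

def groupings_to_ascii_alt (groups : List Int) : String :=
  String.ofList (gtaAltGo groups)

-- ===== PRECONDITION & SPEC =====
def Spec_groupings_to_ascii (groups : List Int) (out : String) : Prop := out = groupings_to_ascii_alt groups
instance (groups : List Int) (out : String) : Decidable (Spec_groupings_to_ascii groups out) := by unfold Spec_groupings_to_ascii; infer_instance

-- ===== CLAIM (what is proved, stated in full; the proofs are below) =====
def Claim_equal_groupings_to_ascii : Prop := ∀ (groups : List Int), Dom_groupings_to_ascii groups → Spec_groupings_to_ascii groups (groupings_to_ascii groups)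

-- ===== LEMMAS AND PROOFS =====
-- cast/negSucc commutation facts for Int >>> (core instance), all rfl
theorem pv_cast_sr (m : Nat) : ((m:Int) >>> (8:Int)) = ((m >>> 8 : Nat) : Int) := rfl
theorem pv_negSucc_sr (m : Nat) : ((Int.negSucc m) >>> (8:Int)) = Int.negSucc (m >>> 8) := rfl
theorem pv_toNat_65280 : ((65280:Int).toNat) = 65280 := rfl
theorem pv_toNat_255 : ((255:Int).toNat) = 255 := rfl
theorem pv_neg_negSucc (k : Nat) : -Int.negSucc k - 1 = (k : Int) := by
  rw [Int.negSucc_eq]; ring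
theorem pv_and255 (x : Nat) : x &&& 255 = x % 256 := by
  have := Nat.and_two_pow_sub_one_eq_mod x 8; norm_num at this; omega

-- A's high byte '(g & 65280) >> 8' equals B's '(g >> 8) & 255', for every Int (negatives included)
theorem pv_hi_byte (a : Int) : (PySem.Int.band a 65280) >>> (8:Int) = PySem.Int.band (a >>> (8:Int)) 255 := by
  cases a with
  | ofNat m =>
    rw [show (Int.ofNat m) = ((m : Nat) : Int) from rfl]
    simp only [PySem.Int.band, pv_cast_sr, pv_toNat_65280, pv_toNat_255, Int.toNat_natCast]
    split_ifs <;> try omega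
    rw [pv_cast_sr]
    congr 1
    rw [Nat.shiftRight_and_distrib, show (65280:Nat) >>> 8 = 255 from rfl]
  | negSucc m =>
    simp only [PySem.Int.band, pv_negSucc_sr, pv_toNat_65280, pv_toNat_255, pv_neg_negSucc,
      Int.toNat_natCast]
    split_ifs <;> try omega
    rw [pv_cast_sr]
    congr 1
    have hle : 65280 &&& m ≤ 65280 := Nat.and_le_left
    have hdist : (65280 &&& m) >>> 8 = 255 &&& (m >>> 8) := by
      rw [Nat.and_comm, Nat.shiftRight_and_distrib, Nat.and_comm,
        show (65280:Nat) >>> 8 = 255 from rfl]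
    have hmod : (65280 &&& m) % 256 = 0 := by
      rw [← pv_and255, Nat.and_assoc, pv_and255]
      have hy1 : (m % 256) &&& 65280 ≤ m % 256 := Nat.and_le_left
      have hy2 : m % 256 < 256 := Nat.mod_lt _ (by norm_num)
      have hz : (65280 &&& (m % 256)) &&& 255 = (m % 256) &&& (65280 &&& 255) := by
        rw [Nat.and_comm 65280 (m % 256), Nat.and_assoc]
      have hz2 : (65280 &&& (m % 256)) &&& 255 = 0 := by
        rw [hz, show (65280:Nat) &&& 255 = 0 from rfl, Nat.and_zero]
      rw [pv_and255] at hz2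
      rw [Nat.and_comm] at hy1
      omega
    have hy : 255 &&& (m >>> 8) ≤ 255 := Nat.and_le_left
    rw [Nat.shiftRight_eq_div_pow] at *
    omega

-- the per-group pair of characters both programs produce
def pvByteChars (g : Int) : List Char :=
  [Char.ofNat (PySem.Int.band (g >>> (8:Int)) 255).toNat, Char.ofNat (PySem.Int.band g 255).toNat]

-- A's first loop builds the flatMap of split pairs
theorem pv_tempA (groups : List Int) (acc : List Int) :
    groups.foldl (fun temp pair =>
      (temp ++ [(pySplit pair).1]) ++ [(pySplit pair).2]) acc
    = acc ++ groups.flatMap (fun pair => [(pySplit pair).1, (pySplit pair).2]) := by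
  induction groups generalizing acc with
  | nil => simp
  | cons p ps ih => simp [List.flatMap]

-- B's recursion flattens to the same character list
theorem pv_gtaAltGo_flat (groups : List Int) : gtaAltGo groups = groups.flatMap pvByteChars := by
  induction groups using gtaAltGo.induct with
  | case1 groups h0 =>
    rw [List.length_eq_zero_iff] at h0
    subst h0
    simp [gtaAltGo]
  | case2 groups h0 h1 =>
    rw [List.length_eq_one_iff] at h1
    obtain ⟨g, rfl⟩ := h1
    simp [gtaAltGo, pvByteChars]
  | case3 groups h0 h1 mid ih1 ih2 =>
    rw [gtaAltGo]
    simp only [if_neg h0, if_neg h1]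
    rw [ih1, ih2, ← List.flatMap_append, List.take_append_drop]

-- ===== VERDICT (by name: the statement is the Claim_ definition above) =====
theorem groupings_to_ascii_spec : Claim_equal_groupings_to_ascii := by
  intro groups _
  unfold Spec_groupings_to_ascii groupings_to_ascii groupings_to_ascii_alt
  simp only [pv_tempA, List.nil_append, PySem.List.foldl_append_singleton_eq_map,
    List.map_flatMap, pv_gtaAltGo_flat]
  congr 1
  apply List.flatMap_congr
  intro x _
  simp [pySplit, pvByteChars, pv_hi_byte]
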